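-- pv_equiv track=rewrite | github.com/shitesh/nlp-headline-generation | headline_generation/python/main/feature_functions/headline_features.py | generate_bigram_counts
-- ===== SOURCE A (Python) =====
-- def generate_bigram_counts(headline_word_tag_list):
--     """ Returns a dictionary with bigram score of each word pair
--     """
--
--     POS_LMProbablity={}
--     count = 0
--     prev = "start"
--     cur = "start"
--     POS_LMProbablity={}
--     #initialization of dictionary
--     for entry in headline_word_tag_list:
--         word, tag = entry.rsplit('/', 1)
--         prev = cur
--         cur = tag
--         POS_LMProbablity[prev] = {}
--
--         if cur in POS_LMProbablity[prev]:
--             POS_LMProbablity[prev][cur]+=1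
--         else:
--             POS_LMProbablity[prev][cur] =1
--
--     return POS_LMProbablity
-- ===== SOURCE B (Python) =====
-- def generate_bigram_counts(headline_word_tag_list):
--     """Two-pass: extract the tag sequence, then build the dict from consecutive
--     tag pairs in one comprehension (last write wins, as in A's reset-then-set)."""
--     tags = ["start"]
--     for entry in headline_word_tag_list:
--         word, tag = entry.rsplit('/', 1)
--         tags.append(tag)
--     return {prev: {cur: 1} for prev, cur in zip(tags, tags[1:])}
-- ===== Notes on version B (the rewrite author's own statement) =====
-- stated objective: simpler
-- what changed: A mutates a nested dict per entry with reset-then-set and carried prev/cur state; B first extracts the tag sequence, then builds the result in one dict comprehension over consecutive tag pairs, relying on last-write-wins.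
import Mathlib
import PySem

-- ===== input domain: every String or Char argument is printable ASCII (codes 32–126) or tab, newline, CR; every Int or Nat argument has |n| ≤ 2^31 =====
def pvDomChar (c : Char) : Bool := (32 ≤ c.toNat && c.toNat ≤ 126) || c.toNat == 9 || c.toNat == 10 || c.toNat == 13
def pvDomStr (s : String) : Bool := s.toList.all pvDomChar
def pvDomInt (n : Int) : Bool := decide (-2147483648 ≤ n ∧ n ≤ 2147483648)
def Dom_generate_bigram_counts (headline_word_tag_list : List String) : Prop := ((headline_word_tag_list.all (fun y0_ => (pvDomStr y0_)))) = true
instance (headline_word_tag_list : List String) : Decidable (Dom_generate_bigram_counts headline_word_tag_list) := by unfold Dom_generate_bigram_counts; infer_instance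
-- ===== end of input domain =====

-- B builds the tag sequence once and forms the dict from consecutive tag pairs
-- in a single comprehension (last write wins), instead of A's per-entry
-- reset-then-set mutation of a nested dict; objective: simpler.


-- shared helper: entry.rsplit('/', 1) unpacked into two targets.
-- Hand port, exact: no '/' in s → rsplit returns [s], the two-target unpack
-- raises ValueError (= none here); otherwise splits at the LAST '/'.
def pvRsplit1 (s : String) : Option (String × String) :=
  if PySem.Str.isIn "/" s then
    let i := PySem.Str.rfind s "/"
    some (PySem.Str.slice s none (some i), PySem.Str.slice s (some (i + 1)) none)
  else none

-- ===== PORT A =====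
-- A's loop state: cur and the nested dict; each step resets d[prev] = {} then sets d[prev][cur].
def generate_bigram_counts_stepA
    (st : String × PySem.Dict String (PySem.Dict String Int)) (entry : String) :
    String × PySem.Dict String (PySem.Dict String Int) :=
  match pvRsplit1 entry with
  | none => st  -- ValueError in Python; unreachable under Pre_
  | some (_word, tag) =>
      let prev := st.1
      let cur := tag
      let d1 := st.2.insert prev PySem.Dict.empty
      let inner := d1.getD prev PySem.Dict.empty
      let d2 :=
        if inner.contains cur then
          d1.insert prev (inner.modify cur 0 (· + 1))
        else
          d1.insert prev (inner.insert cur 1)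
      (cur, d2)

def generate_bigram_counts (headline_word_tag_list : List String) :
    List (String × List (String × Int)) :=
  let final := headline_word_tag_list.foldl generate_bigram_counts_stepA ("start", PySem.Dict.empty)
  final.2.items.map (fun p => (p.1, p.2.items))

-- ===== PORT B =====
def generate_bigram_counts_alt (headline_word_tag_list : List String) :
    List (String × List (String × Int)) :=
  let tags := headline_word_tag_list.foldl
    (fun acc entry =>
      match pvRsplit1 entry with
      | none => acc  -- ValueError in Python; unreachable under Pre_
      | some (_word, tag) => acc ++ [tag]) ["start"]
  let pairs := tags.zip tags.tail
  let d := pairs.foldl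
    (fun d p => d.insert p.1 ((PySem.Dict.empty : PySem.Dict String Int).insert p.2 1))
    PySem.Dict.empty
  d.items.map (fun p => (p.1, p.2.items))

-- ===== PRECONDITION & SPEC =====
-- Pre_ excludes exactly the entries without '/', on which A's two-target unpack
-- of rsplit raises ValueError (B raises the same way).
def Pre_generate_bigram_counts (headline_word_tag_list : List String) : Prop :=
  ∀ e ∈ headline_word_tag_list, PySem.Str.isIn "/" e = true
instance (headline_word_tag_list : List String) : Decidable (Pre_generate_bigram_counts headline_word_tag_list) := by unfold Pre_generate_bigram_counts; infer_instance
def pvWitness_generate_bigram_counts : List String := ["the/DT", "dog/NN", "ran/VB", "fast/NN"]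

def Spec_generate_bigram_counts (headline_word_tag_list : List String) (out : List (String × List (String × Int))) : Prop := out = generate_bigram_counts_alt headline_word_tag_list
instance (headline_word_tag_list : List String) (out : List (String × List (String × Int))) : Decidable (Spec_generate_bigram_counts headline_word_tag_list out) := by unfold Spec_generate_bigram_counts; infer_instance

-- ===== CLAIM (what is proved, stated in full; the proofs are below) =====
def Claim_equal_generate_bigram_counts : Prop := ∀ (headline_word_tag_list : List String), Dom_generate_bigram_counts headline_word_tag_list → Pre_generate_bigram_counts headline_word_tag_list → Spec_generate_bigram_counts headline_word_tag_list (generate_bigram_counts headline_word_tag_list)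

-- ===== LEMMAS AND PROOFS =====

-- the tag of a well-formed entry
def pvTag (e : String) : String := ((pvRsplit1 e).map Prod.snd).getD ""

theorem pvRsplit1_eq_some (e : String) (h : PySem.Str.isIn "/" e = true) :
    pvRsplit1 e = some (PySem.Str.slice e none (some (PySem.Str.rfind e "/")),
                        PySem.Str.slice e (some (PySem.Str.rfind e "/" + 1)) none) := by
  simp only [pvRsplit1, h, if_true]

theorem pvTag_of_some {e : String} {w t : String} (h : pvRsplit1 e = some (w, t)) :
    pvTag e = t := by
  simp [pvTag, h]

-- one well-formed step of A is a plain overwrite d[prev] := {tag: 1}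
theorem stepA_eq {e : String} {w t : String} (h : pvRsplit1 e = some (w, t))
    (c : String) (d : PySem.Dict String (PySem.Dict String Int)) :
    generate_bigram_counts_stepA (c, d) e
      = (t, d.insert c ((PySem.Dict.empty : PySem.Dict String Int).insert t 1)) := by
  simp [generate_bigram_counts_stepA, h, PySem.Dict.getD_insert_self,
        PySem.Dict.insert_insert_self, PySem.Dict.contains_empty]

-- B's tag-collecting fold is acc ++ map pvTag, given well-formedness
theorem tags_fold_eq (l : List String) (acc : List String)
    (hp : ∀ e ∈ l, PySem.Str.isIn "/" e = true) :
    l.foldl (fun acc entry =>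
        match pvRsplit1 entry with
        | none => acc
        | some (_w, tag) => acc ++ [tag]) acc
      = acc ++ l.map pvTag := by
  induction l generalizing acc with
  | nil => simp
  | cons e l ih =>
      obtain ⟨w, t, he⟩ : ∃ w t, pvRsplit1 e = some (w, t) := by
        rcases pvRsplit1_eq_some e (hp e (by simp)) with h
        exact ⟨_, _, h⟩
      simp only [List.foldl_cons, he]
      rw [ih _ (fun x hx => hp x (by simp [hx]))]
      simp [pvTag_of_some he]

-- core: A's fold over entries equals B's fold over consecutive tag pairs
theorem core_eq (l : List String) (c : String)
    (d : PySem.Dict String (PySem.Dict String Int))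
    (hp : ∀ e ∈ l, PySem.Str.isIn "/" e = true) :
    (l.foldl generate_bigram_counts_stepA (c, d)).2
      = ((c :: l.map pvTag).zip (l.map pvTag)).foldl
          (fun d p => d.insert p.1 ((PySem.Dict.empty : PySem.Dict String Int).insert p.2 1)) d := by
  induction l generalizing c d with
  | nil => simp
  | cons e l ih =>
      obtain ⟨w, t, he⟩ : ∃ w t, pvRsplit1 e = some (w, t) := by
        rcases pvRsplit1_eq_some e (hp e (by simp)) with h
        exact ⟨_, _, h⟩
      simp only [List.foldl_cons, List.map_cons, List.zip_cons_cons, stepA_eq he]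
      rw [ih _ _ (fun x hx => hp x (by simp [hx]))]
      simp [pvTag_of_some he]

-- ===== VERDICT (by name: the statement is the Claim_ definition above) =====
theorem generate_bigram_counts_spec : Claim_equal_generate_bigram_counts := by
  intro l _hdom hpre
  unfold Spec_generate_bigram_counts
  unfold generate_bigram_counts generate_bigram_counts_alt
  rw [tags_fold_eq l ["start"] hpre]
  simp only [List.cons_append, List.nil_append, List.tail_cons]
  rw [core_eq l "start" PySem.Dict.empty hpre]
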